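-- pv_equiv track=rewrite | github.com/AClarkey/euler | euler/problems/problems51to60.py | problem_57
-- ===== SOURCE A (Python) =====
-- def problem_57(num: int) -> int:
--     """
--     for sqrt(2),
--     In the first one-thousand expansions, how many fractions contain a numerator with more digits than the denominator?
--     """
--
--     def root_two_iter(iter: num) -> tuple:
--         """return numer/denom of sqtr 2 continued fraction"""
--         if iter == 1:
--             return (3, 2)
--         if iter == 2:
--             return (7, 5)
--         numer_old = 3
--         denom_old = 2
--         numer = 7
--         denom = 5
--         for i in range(2, iter):
--             numer_new = numer * 2 + numer_old
--             denom_new = denom * 2 + denom_old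
--
--             numer_old = numer
--             denom_old = denom
--
--             numer = numer_new
--             denom = denom_new
--         return (numer_new, denom_new)
--
--     output = 0
--     for i in range(1, num + 1):
--         value = root_two_iter(i)
--         if len(str(value[0])) > len(str(value[1])):
--             output += 1
--
--     return output
-- ===== SOURCE B (Python) =====
-- def problem_57(num: int) -> int:
--     output = 0
--     numer, denom = 3, 2
--     for _ in range(num):
--         if len(str(numer)) > len(str(denom)):
--             output += 1
--         numer, denom = numer + 2 * denom, numer + denom
--     return output
-- ===== Notes on version B (the rewrite author's own statement) =====
-- stated objective: faster
-- what changed: B keeps one running convergent pair updated by n,d = n+2d,n+d and counts in a single pass, instead of A's rebuilding each convergent from scratch with an inner loop for every i.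
import Mathlib
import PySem

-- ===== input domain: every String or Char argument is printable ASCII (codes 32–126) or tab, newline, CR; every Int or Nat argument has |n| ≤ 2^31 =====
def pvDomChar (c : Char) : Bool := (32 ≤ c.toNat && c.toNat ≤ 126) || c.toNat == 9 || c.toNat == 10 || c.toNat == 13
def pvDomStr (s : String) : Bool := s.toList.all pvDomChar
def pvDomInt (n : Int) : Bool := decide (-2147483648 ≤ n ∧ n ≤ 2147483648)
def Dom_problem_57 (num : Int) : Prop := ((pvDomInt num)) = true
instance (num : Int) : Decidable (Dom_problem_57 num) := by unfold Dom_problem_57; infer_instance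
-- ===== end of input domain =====

-- B replaces A's per-index recomputation of the √2 convergent (inner loop each i, O(num^2))
-- by a single pass maintaining one running convergent pair (O(num)); objective: faster (asymptotic).


-- ===== PORT A =====
-- helper root_two_iter; for iter ≤ 0 Python would hit an unbound variable, but
-- problem_57 only calls it with iter ≥ 1, so that branch is never reached.
def rootTwoIterA (iter : Int) : Int × Int :=
  if iter = 1 then (3, 2)
  else if iter = 2 then (7, 5)
  else
    let s := (PySem.List.pyRange 2 iter 1).foldl
      (fun (st : (Int × Int) × (Int × Int)) _ =>
        (st.2, (st.2.1 * 2 + st.1.1, st.2.2 * 2 + st.1.2)))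
      ((3, 2), (7, 5))
    s.2

def problem_57 (num : Int) : Int :=
  (PySem.List.pyRange 1 (num + 1) 1).foldl
    (fun output i =>
      let value := rootTwoIterA i
      if PySem.Str.len (PySem.Int.toStr value.1) > PySem.Str.len (PySem.Int.toStr value.2)
      then output + 1 else output) 0

-- ===== PORT B =====
def problem_57_alt (num : Int) : Int :=
  let s := (PySem.List.pyRange 0 num 1).foldl
    (fun (st : Int × Int × Int) _ =>
      (if PySem.Str.len (PySem.Int.toStr st.2.1) > PySem.Str.len (PySem.Int.toStr st.2.2)
       then st.1 + 1 else st.1,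
       st.2.1 + 2 * st.2.2, st.2.1 + st.2.2))
    (0, 3, 2)
  s.1

-- ===== PRECONDITION & SPEC =====
def Spec_problem_57 (num : Int) (out : Int) : Prop := out = problem_57_alt num
instance (num : Int) (out : Int) : Decidable (Spec_problem_57 num out) := by unfold Spec_problem_57; infer_instance

-- ===== CLAIM (what is proved, stated in full; the proofs are below) =====
def Claim_equal_problem_57 : Prop := ∀ (num : Int), Dom_problem_57 num → Spec_problem_57 num (problem_57 num)

-- ===== LEMMAS AND PROOFS =====

-- the convergent pair as B advances it
def pairIter : Nat → Int × Int
  | 0 => (3, 2)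
  | k + 1 => ((pairIter k).1 + 2 * (pairIter k).2, (pairIter k).1 + (pairIter k).2)

-- B's count after k steps
def cnt : Nat → Int
  | 0 => 0
  | k + 1 => cnt k +
      (if PySem.Str.len (PySem.Int.toStr (pairIter k).1) > PySem.Str.len (PySem.Int.toStr (pairIter k).2)
       then 1 else 0)

lemma pairIter_step (k : Nat) :
    pairIter (k + 2) = ((pairIter (k + 1)).1 * 2 + (pairIter k).1,
                        (pairIter (k + 1)).2 * 2 + (pairIter k).2) := by
  simp [pairIter]; constructor <;> ring

lemma foldA_eq (m : Nat) :
    (PySem.List.pyRange 2 (2 + (m : Int)) 1).foldl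
      (fun (st : (Int × Int) × (Int × Int)) _ =>
        (st.2, (st.2.1 * 2 + st.1.1, st.2.2 * 2 + st.1.2)))
      ((3, 2), (7, 5)) = (pairIter m, pairIter (m + 1)) := by
  induction m with
  | zero => simp [PySem.List.pyRange_one_eq_nil, pairIter]
  | succ m ih =>
      have h : (2 : Int) ≤ 2 + (m : Int) := by omega
      have : (2 : Int) + ((m : Int) + 1) = (2 + (m : Int)) + 1 := by ring
      rw [show ((m : Nat) + 1 : Nat) = m + 1 from rfl]
      push_cast
      rw [this, PySem.List.pyRange_one_succ_right h, List.foldl_append, ih]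
      simp [pairIter_step m]

lemma rootTwoIterA_eq (i : Int) (hi : 1 ≤ i) : rootTwoIterA i = pairIter (i - 1).toNat := by
  unfold rootTwoIterA
  by_cases h1 : i = 1
  · simp [h1, pairIter]
  · by_cases h2 : i = 2
    · simp [h2, pairIter]
    · have h3 : 3 ≤ i := by omega
      simp only [if_neg h1, if_neg h2]
      have hm : i = 2 + ((i - 2).toNat : Int) := by omega
      rw [hm, foldA_eq ((i - 2).toNat)]
      have : (2 + ((i - 2).toNat : Int) - 1).toNat = (i - 2).toNat + 1 := by omega
      rw [this]

lemma foldA_outer (m : Nat) :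
    (PySem.List.pyRange 1 (1 + (m : Int)) 1).foldl
      (fun output i =>
        let value := rootTwoIterA i
        if PySem.Str.len (PySem.Int.toStr value.1) > PySem.Str.len (PySem.Int.toStr value.2)
        then output + 1 else output) 0 = cnt m := by
  induction m with
  | zero => simp [PySem.List.pyRange_one_eq_nil, cnt]
  | succ m ih =>
      have h : (1 : Int) ≤ 1 + (m : Int) := by omega
      have hc : (1 : Int) + ((m : Int) + 1) = (1 + (m : Int)) + 1 := by ring
      push_cast
      rw [hc, PySem.List.pyRange_one_succ_right h, List.foldl_append, ih]
      have hr : rootTwoIterA (1 + (m : Int)) = pairIter m := by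
        rw [rootTwoIterA_eq _ (by omega)]
        congr 1; omega
      simp only [List.foldl, hr, cnt]
      split_ifs <;> simp

lemma foldB (m : Nat) :
    (PySem.List.pyRange 0 (m : Int) 1).foldl
      (fun (st : Int × Int × Int) _ =>
        (if PySem.Str.len (PySem.Int.toStr st.2.1) > PySem.Str.len (PySem.Int.toStr st.2.2)
         then st.1 + 1 else st.1,
         st.2.1 + 2 * st.2.2, st.2.1 + st.2.2))
      (0, 3, 2) = (cnt m, pairIter m) := by
  induction m with
  | zero => simp [PySem.List.pyRange_one_eq_nil, cnt, pairIter]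
  | succ m ih =>
      have h : (0 : Int) ≤ (m : Int) := by omega
      push_cast
      rw [PySem.List.pyRange_one_succ_right h, List.foldl_append, ih]
      simp only [List.foldl, cnt, pairIter]
      split_ifs <;> simp

-- ===== VERDICT (by name: the statement is the Claim_ definition above) =====
theorem problem_57_spec : Claim_equal_problem_57 := by
  intro num _
  unfold Spec_problem_57 problem_57 problem_57_alt
  by_cases h : num ≤ 0
  · rw [PySem.List.pyRange_one_eq_nil (by omega : num + 1 ≤ 1),
        PySem.List.pyRange_one_eq_nil (by omega : num ≤ 0)]
    rfl
  · have hm : num = (num.toNat : Int) := by omega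
    rw [hm]
    have h1 : ((num.toNat : Int)) + 1 = 1 + (num.toNat : Int) := by ring
    rw [h1, foldA_outer, foldB]
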